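-- pv_equiv track=rewrite | github.com/epn-vespa/FacilityList | src/data_updater/extractor/pds_extractor.py | _last_versions
-- ===== SOURCE A (Python) =====
-- def _last_versions(
--                    id_list: list) -> list:
--     """
--     Sort a list of pds ids and keep only the latest version
--     if there are multiple versions.
--
--     Keyword arguments:
--     id_list -- list of XML files
--     """
--     new_list = []
--
--     # prepare temporary a dict with name as key and a dict in value,
--     # version as key and id in value.
--     # Example:
--     # telescope_a_1.0.xml
--     # telescope_b_1.0.xml
--     # telescope_b_1.1.xml
--     # will result in:
--     # names = {
--     #   "telescope_a": {
--     #       "1.0": "telescope_a_1.0.xml"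
--     #   },
--     #   "telescope_b": {
--     #       "1.0": "telescope_b_1.0.xml"
--     #       "1.1": "telescope_b_1.1.xml"
--     #   }
--     # }
--     names = {}
--     for item in id_list:
--         # we need to split name and version
--         pieces = item.split('_')
--         name = "_".join(pieces[:-1])
--         version = pieces[-1].replace(".xml", "")
--         if name in names.keys():
--             names[name][version] = item
--         else:
--             names[name] = {version: item}
--     for name, versions in names.items():
--         max_version = max(versions.keys())
--         new_list.append(versions[max_version])
--     return new_list
-- ===== SOURCE B (Python) =====
-- def _last_versions(
--                    id_list: list) -> list:
--     """Single pass: keep, per name, the (version, item) pair with the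
--     greatest version string (last occurrence wins on ties)."""
--     best = {}
--     for item in id_list:
--         pieces = item.split('_')
--         name = "_".join(pieces[:-1])
--         version = pieces[-1].replace(".xml", "")
--         cur = best.get(name)
--         if cur is None or cur[0] <= version:
--             best[name] = (version, item)
--     return [it for (_, it) in best.values()]
-- ===== Notes on version B (the rewrite author's own statement) =====
-- stated objective: simpler
-- what changed: Replaces A's nested dict of all versions per name plus a second max-reduce pass with a single pass keeping only the running best (version, item) pair per name.
import Mathlib
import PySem

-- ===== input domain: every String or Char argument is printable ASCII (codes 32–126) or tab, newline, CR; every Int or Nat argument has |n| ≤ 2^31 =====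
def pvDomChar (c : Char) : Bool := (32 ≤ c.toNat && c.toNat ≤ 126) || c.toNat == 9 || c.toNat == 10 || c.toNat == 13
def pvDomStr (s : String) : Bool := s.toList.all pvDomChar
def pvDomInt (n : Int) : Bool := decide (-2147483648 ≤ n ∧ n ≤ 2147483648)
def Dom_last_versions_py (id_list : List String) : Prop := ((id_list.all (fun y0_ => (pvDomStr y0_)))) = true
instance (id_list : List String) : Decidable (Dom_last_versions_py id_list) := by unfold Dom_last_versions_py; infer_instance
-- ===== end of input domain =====

-- B keeps, per name, only the running best (version, item) pair in one pass instead of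
-- A's nested dict of all versions followed by a max-reduce pass (objective: simpler).

-- ===== PORT A =====
-- shared split logic (both Pythons compute name/version by exactly these lines):
-- pieces = item.split('_'); name = "_".join(pieces[:-1]); version = pieces[-1].replace(".xml", "")
-- split('_') never raises (sep ≠ "") and always yields a nonempty list, so the getD defaults are never taken.
def pvNameOf (item : String) : String :=
  PySem.Str.join "_" (PySem.List.slice ((PySem.Str.split? item "_").getD []) none (some (-1)))

def pvVerOf (item : String) : String :=
  PySem.Str.replace ((PySem.List.pyGet? ((PySem.Str.split? item "_").getD []) (-1)).getD "") ".xml" ""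

-- body of A's first for-loop
def pvStepA (names : PySem.Dict String (PySem.Dict String String)) (item : String) :
    PySem.Dict String (PySem.Dict String String) :=
  if names.contains (pvNameOf item) then
    names.insert (pvNameOf item)
      ((names.getD (pvNameOf item) PySem.Dict.empty).insert (pvVerOf item) item)
  else
    names.insert (pvNameOf item) (PySem.Dict.ofList [(pvVerOf item, item)])

def last_versions_py (id_list : List String) : List String :=
  let names := id_list.foldl pvStepA PySem.Dict.empty
  -- second loop: for name, versions in names.items(): new_list.append(versions[max(versions.keys())])
  -- every inner dict is nonempty and contains its own max key, so the getD defaults are never taken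
  names.items.foldl
    (fun new_list p =>
      let max_version := (PySem.List.max? p.2.keys (fun x => x)).getD ""
      new_list ++ [p.2.getD max_version ""]) []

-- ===== PORT B =====
-- body of B's single loop
def pvStepB (best : PySem.Dict String (String × String)) (item : String) :
    PySem.Dict String (String × String) :=
  match best.get? (pvNameOf item) with
  | none => best.insert (pvNameOf item) (pvVerOf item, item)
  | some cur =>
    if cur.1 ≤ pvVerOf item then best.insert (pvNameOf item) (pvVerOf item, item) else best

def last_versions_py_alt (id_list : List String) : List String :=
  (id_list.foldl pvStepB PySem.Dict.empty).values.map (fun p => p.2)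

-- ===== PRECONDITION & SPEC =====
def Spec_last_versions_py (id_list : List String) (out : List String) : Prop := out = last_versions_py_alt id_list
instance (id_list : List String) (out : List String) : Decidable (Spec_last_versions_py id_list out) := by unfold Spec_last_versions_py; infer_instance

-- ===== CLAIM (what is proved, stated in full; the proofs are below) =====
def Claim_equal_last_versions_py : Prop := ∀ (id_list : List String), Dom_last_versions_py id_list → Spec_last_versions_py id_list (last_versions_py id_list)

-- ===== LEMMAS AND PROOFS =====

-- the invariant tying a (name, all-versions-dict) entry of A to a (name, best pair) entry of B
def pvRel (q : String × PySem.Dict String String) (p : String × (String × String)) : Prop :=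
  q.1 = p.1 ∧ PySem.List.max? q.2.keys (fun x => x) = some p.2.1 ∧ q.2.getD p.2.1 "" = p.2.2

lemma pvRel_fst {its1 : List (String × PySem.Dict String String)}
    {its2 : List (String × (String × String))} (h : List.Forall₂ pvRel its1 its2) :
    its1.map (·.1) = its2.map (·.1) := by
  induction h with
  | nil => rfl
  | cons hr _ ih => simp [ih, hr.1]

-- the heart: inserting one more (version, item) into an inner dict moves its max entry
-- exactly as B's running-best update does
lemma pvInner_step (inner : PySem.Dict String String) (bv bi v item : String)
    (hmax : PySem.List.max? inner.keys (fun x => x) = some bv)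
    (hget : inner.getD bv "" = bi) :
    PySem.List.max? (inner.insert v item).keys (fun x => x) = some (if bv ≤ v then v else bv)
    ∧ (inner.insert v item).getD (if bv ≤ v then v else bv) "" = (if bv ≤ v then item else bi) := by
  have hmem : bv ∈ inner.keys := PySem.List.max?_mem hmax
  by_cases hc : inner.contains v = true
  · have hkeys := PySem.Dict.keys_insert_of_contains inner item hc
    have hvmem : v ∈ inner.keys := (PySem.Dict.contains_iff_mem_keys inner v).1 hc
    have hvle : v ≤ bv := PySem.List.max?_isMax hmax v hvmem
    by_cases hle : bv ≤ v
    · have hvb : v = bv := le_antisymm hvle hle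
      subst hvb
      refine ⟨by rw [hkeys, hmax, if_pos hle], ?_⟩
      rw [if_pos hle, if_pos hle, PySem.Dict.getD_insert_self]
    · refine ⟨by rw [hkeys, hmax, if_neg hle], ?_⟩
      have hne : bv ≠ v := fun h => hle (le_of_eq h)
      rw [if_neg hle, if_neg hle, PySem.Dict.getD_insert_of_ne _ _ _ hne, hget]
  · have hc' : inner.contains v = false := by simpa using hc
    have hkeys := PySem.Dict.keys_insert_of_not_contains inner item hc'
    have hvnm : v ∉ inner.keys := fun h => hc ((PySem.Dict.contains_iff_mem_keys inner v).2 h)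
    have hne : bv ≠ v := fun h => hvnm (h ▸ hmem)
    obtain ⟨x, t, hxt⟩ : ∃ x t, inner.keys = x :: t := by
      cases hk : inner.keys with
      | nil => rw [hk] at hmax; simp [PySem.List.max?] at hmax
      | cons x t => exact ⟨x, t, rfl⟩
    rw [hxt, PySem.List.max?_id_cons] at hmax
    have hfold : t.foldl max x = bv := Option.some.inj hmax
    have hmax' : PySem.List.max? (inner.insert v item).keys (fun x => x) = some (max bv v) := by
      rw [hkeys, hxt]
      show PySem.List.max? (x :: (t ++ [v])) (fun x => x) = some (max bv v)
      rw [PySem.List.max?_id_cons, List.foldl_append, hfold]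
      rfl
    have hmv : max bv v = if bv ≤ v then v else bv := max_def bv v
    refine ⟨by rw [hmax', hmv], ?_⟩
    by_cases hle : bv ≤ v
    · rw [if_pos hle, if_pos hle, PySem.Dict.getD_insert_self]
    · rw [if_neg hle, if_neg hle, PySem.Dict.getD_insert_of_ne _ _ _ hne, hget]

-- mapping both related item lists by "replace the entry at key n" preserves the invariant
lemma pvForall₂_map (n : String) (anew : PySem.Dict String String) (bnew : String × String)
    {its1 : List (String × PySem.Dict String String)} {its2 : List (String × (String × String))}
    (h : List.Forall₂ pvRel its1 its2)
    (hmatch : ∀ q ∈ its1, ∀ p ∈ its2, pvRel q p → q.1 = n → pvRel (n, anew) (n, bnew)) :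
    List.Forall₂ pvRel (its1.map (fun q => if q.1 == n then (n, anew) else q))
                       (its2.map (fun p => if p.1 == n then (n, bnew) else p)) := by
  induction h with
  | nil => simp
  | cons hr htl ih =>
    rename_i q p its1' its2'
    simp only [List.map_cons]
    by_cases hq : q.1 = n
    · have hp : p.1 = n := hr.1 ▸ hq
      rw [if_pos (by simpa using hq), if_pos (by simpa using hp)]
      exact List.Forall₂.cons (hmatch q (by simp) p (by simp) hr hq)
        (ih (fun q' hq' p' hp' => hmatch q' (by simp [hq']) p' (by simp [hp'])))
    · have hp : ¬ p.1 = n := hr.1 ▸ hq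
      rw [if_neg (by simpa using hq), if_neg (by simpa using hp)]
      exact List.Forall₂.cons hr
        (ih (fun q' hq' p' hp' => hmatch q' (by simp [hq']) p' (by simp [hp'])))

-- one loop iteration preserves the invariant and key uniqueness
lemma pvStep_pres (names : PySem.Dict String (PySem.Dict String String))
    (best : PySem.Dict String (String × String)) (item : String)
    (h : List.Forall₂ pvRel names.items best.items)
    (hnA : names.keys.Nodup) (hnB : best.keys.Nodup) :
    List.Forall₂ pvRel (pvStepA names item).items (pvStepB best item).items
    ∧ (pvStepA names item).keys.Nodup ∧ (pvStepB best item).keys.Nodup := by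
  have hkeysEq : names.keys = best.keys := pvRel_fst h
  by_cases hc : names.contains (pvNameOf item) = true
  · -- key already present in both dicts
    have hcB : best.contains (pvNameOf item) = true := by
      rw [PySem.Dict.contains_eq_decide_mem_keys] at hc ⊢
      rwa [← hkeysEq]
    obtain ⟨pb, hpb⟩ : ∃ pb, best.get? (pvNameOf item) = some pb := by
      have := PySem.Dict.contains_eq_isSome_get? best (pvNameOf item)
      rw [hcB] at this
      exact Option.isSome_iff_exists.mp this.symm
    have hA : pvStepA names item
        = names.insert (pvNameOf item)
            ((names.getD (pvNameOf item) PySem.Dict.empty).insert (pvVerOf item) item) := by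
      unfold pvStepA; rw [if_pos hc]
    have hB : pvStepB best item
        = if pb.1 ≤ pvVerOf item
            then best.insert (pvNameOf item) (pvVerOf item, item) else best := by
      unfold pvStepB; rw [hpb]
    set inner := names.getD (pvNameOf item) PySem.Dict.empty with hinner
    set bnew : String × String := if pb.1 ≤ pvVerOf item then (pvVerOf item, item) else pb
      with hbnew
    have hmatch : ∀ q ∈ names.items, ∀ p ∈ best.items, pvRel q p → q.1 = pvNameOf item →
        pvRel (pvNameOf item, inner.insert (pvVerOf item) item) (pvNameOf item, bnew) := by
      intro q hq p hp hr hq1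
      have hq' : (q.1, q.2) ∈ names.items := hq
      rw [hq1] at hq'
      have hq2 : inner = q.2 := by
        rw [hinner]
        exact PySem.Dict.getD_of_mem_items names hq' hnA PySem.Dict.empty
      have hp' : (p.1, p.2) ∈ best.items := hp
      have hget? := PySem.Dict.get?_of_mem_items best hp' hnB
      have hp1 : p.1 = pvNameOf item := hr.1 ▸ hq1
      rw [hp1, hpb] at hget?
      have hp2 : p = (pvNameOf item, pb) := Prod.ext hp1 (Option.some.inj hget?).symm
      obtain ⟨hfst, hmax, hget⟩ := hr
      rw [hp2] at hmax hget
      rw [← hq2] at hmax hget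
      obtain ⟨hmax', hget'⟩ := pvInner_step inner pb.1 pb.2 (pvVerOf item) item hmax hget
      refine ⟨rfl, ?_, ?_⟩
      · rw [hmax', hbnew]; by_cases hle : pb.1 ≤ pvVerOf item <;> simp [hle]
      · rw [hbnew]; by_cases hle : pb.1 ≤ pvVerOf item
        · simp only [hle, if_true] at hget' ⊢
          exact hget'
        · simp only [hle, if_false] at hget' ⊢
          exact hget'
    have hfa : List.Forall₂ pvRel (pvStepA names item).items
        (best.items.map (fun p => if p.1 == pvNameOf item then (pvNameOf item, bnew) else p)) := by
      rw [hA, PySem.Dict.items_insert_of_contains names (inner.insert (pvVerOf item) item) hc]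
      exact pvForall₂_map (pvNameOf item) (inner.insert (pvVerOf item) item) bnew h hmatch
    have hitemsB : (pvStepB best item).items
        = best.items.map (fun p => if p.1 == pvNameOf item then (pvNameOf item, bnew) else p) := by
      by_cases hle : pb.1 ≤ pvVerOf item
      · rw [hB, if_pos hle, PySem.Dict.items_insert_of_contains best (pvVerOf item, item) hcB,
          hbnew, if_pos hle]
      · rw [hB, if_neg hle, hbnew, if_neg hle]
        have : best.items.map (fun p => if p.1 == pvNameOf item then (pvNameOf item, pb) else p)
            = best.items.map id := by
          refine List.map_congr_left ?_
          intro p hp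
          by_cases hp1 : p.1 = pvNameOf item
          · have hp' : (p.1, p.2) ∈ best.items := hp
            have hget? := PySem.Dict.get?_of_mem_items best hp' hnB
            rw [hp1, hpb] at hget?
            have : p = (pvNameOf item, pb) := Prod.ext hp1 (Option.some.inj hget?).symm
            simp [this]
          · simp [hp1]
        rw [this, List.map_id]
    refine ⟨hitemsB ▸ hfa, ?_, ?_⟩
    · rw [hA]; exact PySem.Dict.nodup_keys_insert _ _ _ hnA
    · rw [hB]; by_cases hle : pb.1 ≤ pvVerOf item
      · rw [if_pos hle]; exact PySem.Dict.nodup_keys_insert _ _ _ hnB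
      · rwa [if_neg hle]
  · -- fresh key: both append at the end
    have hc' : names.contains (pvNameOf item) = false := by simpa using hc
    have hcB : best.contains (pvNameOf item) = false := by
      rw [PySem.Dict.contains_eq_decide_mem_keys] at hc' ⊢
      rwa [← hkeysEq]
    have hgB : best.get? (pvNameOf item) = none := by
      have := PySem.Dict.contains_eq_isSome_get? best (pvNameOf item)
      rw [hcB] at this
      simpa using this.symm
    have hA : pvStepA names item
        = names.insert (pvNameOf item) (PySem.Dict.ofList [(pvVerOf item, item)]) := by
      unfold pvStepA; rw [if_neg (by simp [hc'])]
    have hB : pvStepB best item = best.insert (pvNameOf item) (pvVerOf item, item) := by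
      unfold pvStepB; rw [hgB]
    refine ⟨?_, ?_, ?_⟩
    · rw [hA, hB, PySem.Dict.items_insert_of_not_contains names _ hc',
        PySem.Dict.items_insert_of_not_contains best _ hcB]
      refine List.rel_append h ?_
      refine List.Forall₂.cons ⟨rfl, ?_, ?_⟩ List.Forall₂.nil
      · show PySem.List.max? [pvVerOf item] (fun x => x) = some (pvVerOf item)
        rw [PySem.List.max?_id_cons]; rfl
      · show (PySem.Dict.ofList [(pvVerOf item, item)]).getD (pvVerOf item) "" = item
        simp [PySem.Dict.ofList, PySem.Dict.update, PySem.Dict.getD, PySem.Dict.get?_insert_self]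
    · rw [hA]; exact PySem.Dict.nodup_keys_insert _ _ _ hnA
    · rw [hB]; exact PySem.Dict.nodup_keys_insert _ _ _ hnB

lemma pvLoop_inv (l : List String) (names : PySem.Dict String (PySem.Dict String String))
    (best : PySem.Dict String (String × String))
    (h : List.Forall₂ pvRel names.items best.items)
    (hnA : names.keys.Nodup) (hnB : best.keys.Nodup) :
    List.Forall₂ pvRel (l.foldl pvStepA names).items (l.foldl pvStepB best).items := by
  induction l generalizing names best with
  | nil => exact h
  | cons x xs ih =>
    obtain ⟨h', hnA', hnB'⟩ := pvStep_pres names best x h hnA hnB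
    have hnA2 : (pvStepA names x).keys.Nodup := hnA'
    have hnB2 : (pvStepB best x).keys.Nodup := hnB'
    exact ih _ _ h' hnA2 hnB2

lemma pvOut_eq {its1 : List (String × PySem.Dict String String)}
    {its2 : List (String × (String × String))} (h : List.Forall₂ pvRel its1 its2) :
    its1.map (fun q => q.2.getD ((PySem.List.max? q.2.keys (fun x => x)).getD "") "")
      = its2.map (fun p => p.2.2) := by
  induction h with
  | nil => rfl
  | cons hr _ ih =>
    obtain ⟨_, hmax, hget⟩ := hr
    simp only [List.map_cons, ih, hmax, Option.getD_some, hget]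

-- ===== VERDICT (by name: the statement is the Claim_ definition above) =====
theorem last_versions_py_spec : Claim_equal_last_versions_py := by
  intro id_list _
  unfold Spec_last_versions_py last_versions_py last_versions_py_alt
  have hinv := pvLoop_inv id_list PySem.Dict.empty PySem.Dict.empty
    List.Forall₂.nil PySem.Dict.nodup_keys_empty PySem.Dict.nodup_keys_empty
  rw [PySem.List.foldl_append_singleton_eq_map]
  have hB : (id_list.foldl pvStepB PySem.Dict.empty).values.map (fun p => p.2)
      = (id_list.foldl pvStepB PySem.Dict.empty).items.map (fun p => p.2.2) := by
    simp only [PySem.Dict.values, List.map_map]; rfl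
  rw [hB]
  simpa using pvOut_eq hinv
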